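-- pv_equiv track=rewrite | github.com/barcern/cfg-python | project/barbora_cfg_project.py | list_options
-- ===== SOURCE A (Python) =====
-- def list_options(breed_list, user_category):
--     """Create a list of available options so that users can choose a
--     characteristic which is available and will lead to results.
--     Also to be used to verify validity of options during user input.
--     """
--     options = []
--     for breed in breed_list:
--         try:
--             breed[user_category]
--         except KeyError:
--             pass
--         else:
--             # Ensure that breeds are not repeated in a list even if they
--             # match multiple characteristics
--             string = breed[user_category]
--             string_split = string.split(", ")
--             for item in string_split:
--                 if item in options:
--                     pass
--                 else:
--                     options.append(item)
--     options.sort()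
--     options.append("any")
--     return options
-- ===== SOURCE B (Python) =====
-- def list_options(breed_list, user_category):
--     """Collect every option of every breed into one flat list, sort it,
--     then remove adjacent duplicates in a single pass; finally append 'any'."""
--     flat = []
--     for breed in breed_list:
--         try:
--             s = breed[user_category]
--         except KeyError:
--             continue
--         flat.extend(s.split(", "))
--     flat.sort()
--     result = []
--     for x in flat:
--         if not result or x != result[-1]:
--             result.append(x)
--     result.append("any")
--     return result
-- ===== Notes on version B (the rewrite author's own statement) =====
-- stated objective: alternative
-- what changed: Replaces A's per-item 'if item in options' membership scan during accumulation by flattening all split pieces into one list, sorting it, and removing adjacent duplicates in a single pass before appending 'any'.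
import Mathlib
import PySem

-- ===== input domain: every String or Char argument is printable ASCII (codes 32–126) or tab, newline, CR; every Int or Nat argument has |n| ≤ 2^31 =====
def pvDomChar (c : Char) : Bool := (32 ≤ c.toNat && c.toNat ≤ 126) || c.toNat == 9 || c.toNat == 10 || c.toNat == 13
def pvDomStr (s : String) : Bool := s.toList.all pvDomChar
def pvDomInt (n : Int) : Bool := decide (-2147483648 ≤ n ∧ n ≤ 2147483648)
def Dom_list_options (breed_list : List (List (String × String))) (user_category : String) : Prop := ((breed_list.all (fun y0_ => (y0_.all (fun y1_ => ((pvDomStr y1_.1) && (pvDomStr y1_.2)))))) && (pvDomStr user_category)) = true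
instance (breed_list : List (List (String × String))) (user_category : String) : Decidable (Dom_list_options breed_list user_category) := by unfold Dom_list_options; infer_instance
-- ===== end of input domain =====

-- B replaces A's per-item membership scan by flatten + sort + adjacent-duplicate removal (alternative decomposition).

-- ===== PORT A =====
-- A: accumulate options with an 'if item in options' membership check, then sort, then append "any".
def list_options (breed_list : List (List (String × String))) (user_category : String) : List String :=
  let options := breed_list.foldl (fun opts breed =>
    match PySem.Dict.get? ⟨breed⟩ user_category with
    | none => opts                                   -- except KeyError: pass
    | some s =>
        ((PySem.Str.split? s ", ").getD []).foldl (fun o item =>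
          if o.contains item then o else o ++ [item]) opts) []
  PySem.List.sorted options (fun x => x) false ++ ["any"]

-- ===== PORT B =====
-- B: one flat list of all split pieces, sorted, adjacent duplicates dropped, then "any".
def list_options_alt (breed_list : List (List (String × String))) (user_category : String) : List String :=
  let flat := breed_list.foldl (fun acc breed =>
    match PySem.Dict.get? ⟨breed⟩ user_category with
    | none => acc
    | some s => acc ++ (PySem.Str.split? s ", ").getD []) []
  let srt := PySem.List.sorted flat (fun x => x) false
  let result := srt.foldl (fun res x =>
    if res.getLast? = some x then res else res ++ [x]) []
  result ++ ["any"]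

-- ===== PRECONDITION & SPEC =====
def Spec_list_options (breed_list : List (List (String × String))) (user_category : String) (out : List String) : Prop := out = list_options_alt breed_list user_category
instance (breed_list : List (List (String × String))) (user_category : String) (out : List String) : Decidable (Spec_list_options breed_list user_category out) := by unfold Spec_list_options; infer_instance

-- ===== CLAIM (what is proved, stated in full; the proofs are below) =====
def Claim_equal_list_options : Prop := ∀ (breed_list : List (List (String × String))) (user_category : String), Dom_list_options breed_list user_category → Spec_list_options breed_list user_category (list_options breed_list user_category)

-- ===== LEMMAS AND PROOFS =====

-- the pieces contributed by one breed
def pvPieces (user_category : String) (breed : List (String × String)) : List String :=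
  match PySem.Dict.get? ⟨breed⟩ user_category with
  | none => []
  | some s => (PySem.Str.split? s ", ").getD []

-- named copies of the two loop bodies (definitionally equal to the inline lambdas)
def pvStepA (user_category : String) (opts : List String) (breed : List (String × String)) : List String :=
  match PySem.Dict.get? ⟨breed⟩ user_category with
  | none => opts
  | some s =>
      ((PySem.Str.split? s ", ").getD []).foldl (fun o item =>
        if o.contains item then o else o ++ [item]) opts

def pvStepB (user_category : String) (acc : List String) (breed : List (String × String)) : List String :=
  match PySem.Dict.get? ⟨breed⟩ user_category with
  | none => acc
  | some s => acc ++ (PySem.Str.split? s ", ").getD []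

def pvDedupStep (res : List String) (x : String) : List String :=
  if res.getLast? = some x then res else res ++ [x]

-- A's accumulation step is PySem.Set.update with that breed's pieces
theorem stepA_eq_update (user_category : String) (opts : List String) (breed : List (String × String)) :
    pvStepA user_category opts breed = PySem.Set.update opts (pvPieces user_category breed) := by
  unfold pvStepA pvPieces
  cases PySem.Dict.get? ⟨breed⟩ user_category <;> rfl

theorem stepB_eq (user_category : String) (acc : List String) (breed : List (String × String)) :
    pvStepB user_category acc breed = acc ++ pvPieces user_category breed := by
  unfold pvStepB pvPieces
  cases PySem.Dict.get? ⟨breed⟩ user_category <;> simp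

theorem memA (user_category : String) :
    ∀ (bl : List (List (String × String))) (acc : List String) (x : String),
      x ∈ bl.foldl (pvStepA user_category) acc
      ↔ x ∈ acc ∨ x ∈ bl.flatMap (pvPieces user_category) := by
  intro bl
  induction bl with
  | nil => simp
  | cons b bs ih =>
      intro acc x
      simp only [List.foldl_cons, stepA_eq_update, ih, PySem.Set.mem_update,
        List.flatMap_cons, List.mem_append]
      tauto

theorem nodupA (user_category : String) :
    ∀ (bl : List (List (String × String))) (acc : List String), acc.Nodup →
      (bl.foldl (pvStepA user_category) acc).Nodup := by
  intro bl
  induction bl with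
  | nil => intro acc h; simpa using h
  | cons b bs ih =>
      intro acc h
      simp only [List.foldl_cons, stepA_eq_update]
      exact ih _ (PySem.Set.nodup_update _ _ h)

-- B's flattening loop is flatMap
theorem flatB_eq (user_category : String) :
    ∀ (bl : List (List (String × String))) (acc : List String),
      bl.foldl (pvStepB user_category) acc
      = acc ++ bl.flatMap (pvPieces user_category) := by
  intro bl
  induction bl with
  | nil => simp
  | cons b bs ih =>
      intro acc
      simp only [List.foldl_cons, stepB_eq, ih, List.flatMap_cons, List.append_assoc]

-- every element of a strictly increasing list is ≤ its last element
theorem le_getLast_of_pairwise_lt :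
    ∀ (l : List String) (m : String), l.Pairwise (· < ·) → l.getLast? = some m →
      ∀ a ∈ l, a ≤ m := by
  intro l
  induction l with
  | nil => intro m _ h; simp at h
  | cons x xs ih =>
      intro m hp hl a ha
      cases xs with
      | nil =>
          simp only [List.getLast?_singleton, Option.some.injEq] at hl
          simp only [List.mem_singleton] at ha
          simp [ha, hl]
      | cons y ys =>
          have hl' : (y :: ys).getLast? = some m := by
            simpa [List.getLast?_cons_cons] using hl
          have hm : m ∈ y :: ys := List.mem_of_getLast? hl'
          rcases List.mem_cons.1 ha with rfl | ha'
          · exact le_of_lt ((List.pairwise_cons.1 hp).1 m hm)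
          · exact ih m (List.pairwise_cons.1 hp).2 hl' a ha'

-- invariant of the adjacent-dedup fold
theorem dedup_inv :
    ∀ (l acc : List String), acc.Pairwise (· < ·) → l.Pairwise (· ≤ ·) →
      (∀ a ∈ acc, ∀ y ∈ l, a ≤ y) →
      (l.foldl pvDedupStep acc).Pairwise (· < ·)
      ∧ ∀ x, x ∈ l.foldl pvDedupStep acc ↔ x ∈ acc ∨ x ∈ l := by
  intro l
  induction l with
  | nil => intro acc hp _ _; exact ⟨hp, by simp⟩
  | cons y ys ih =>
      intro acc hp hl hle
      have hley : ∀ a ∈ acc, a ≤ y := fun a ha => hle a ha y List.mem_cons_self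
      have hyys : ∀ z ∈ ys, y ≤ z := (List.pairwise_cons.1 hl).1
      have hl' : ys.Pairwise (· ≤ ·) := (List.pairwise_cons.1 hl).2
      simp only [List.foldl_cons]
      by_cases h : acc.getLast? = some y
      · have hstep : pvDedupStep acc y = acc := by simp [pvDedupStep, h]
        rw [hstep]
        have hy : y ∈ acc := List.mem_of_getLast? h
        obtain ⟨P, M⟩ := ih acc hp hl'
          (fun a ha z hz => le_trans (hley a ha) (hyys z hz))
        refine ⟨P, fun x => ?_⟩
        rw [M x]
        constructor
        · rintro (hx | hx)
          · exact Or.inl hx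
          · exact Or.inr (List.mem_cons_of_mem _ hx)
        · rintro (hx | hx)
          · exact Or.inl hx
          · rcases List.mem_cons.1 hx with rfl | hx'
            · exact Or.inl hy
            · exact Or.inr hx'
      · have hstep : pvDedupStep acc y = acc ++ [y] := by simp [pvDedupStep, h]
        rw [hstep]
        have hpy : (acc ++ [y]).Pairwise (· < ·) := by
          rw [List.pairwise_append]
          refine ⟨hp, by simp, ?_⟩
          intro a ha b hb
          simp only [List.mem_singleton] at hb; subst hb
          rcases lt_or_eq_of_le (hley a ha) with h1 | h1
          · exact h1
          · exfalso
            subst h1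
            have hne : acc ≠ [] := List.ne_nil_of_mem ha
            obtain ⟨m, hm⟩ := List.getLast?_isSome.2 hne |> Option.isSome_iff_exists.1
            have h1 := le_getLast_of_pairwise_lt acc m hp hm a ha
            have h2 := hley m (List.mem_of_getLast? hm)
            have : m = a := le_antisymm h2 h1
            exact h (this ▸ hm)
        obtain ⟨P, M⟩ := ih (acc ++ [y]) hpy hl' (fun a ha z hz => by
          rcases List.mem_append.1 ha with h1 | h1
          · exact le_trans (hley a h1) (hyys z hz)
          · simp only [List.mem_singleton] at h1; subst h1; exact hyys z hz)
        refine ⟨P, fun x => ?_⟩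
        rw [M x]
        simp only [List.mem_append, List.mem_cons]
        tauto

-- ===== VERDICT (by name: the statement is the Claim_ definition above) =====
theorem list_options_spec : Claim_equal_list_options := by
  intro bl cat _
  show list_options bl cat = list_options_alt bl cat
  have hA : list_options bl cat
      = PySem.List.sorted (bl.foldl (pvStepA cat) []) (fun x => x) false ++ ["any"] := rfl
  have hB : list_options_alt bl cat
      = ((PySem.List.sorted (bl.foldl (pvStepB cat) []) (fun x => x) false).foldl pvDedupStep [])
        ++ ["any"] := rfl
  rw [hA, hB]
  have hflat : bl.foldl (pvStepB cat) [] = bl.flatMap (pvPieces cat) := by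
    simpa using flatB_eq cat bl []
  rw [hflat]
  have hsle : (PySem.List.sorted (bl.flatMap (pvPieces cat)) (fun x => x) false).Pairwise (· ≤ ·) := by
    simpa using PySem.List.sorted_pairwise (bl.flatMap (pvPieces cat)) (fun x => x)
  obtain ⟨P, M⟩ := dedup_inv (PySem.List.sorted (bl.flatMap (pvPieces cat)) (fun x => x) false) []
    (by simp) hsle (by simp)
  congr 1
  have hnodupU : ((PySem.List.sorted (bl.flatMap (pvPieces cat)) (fun x => x) false).foldl
      pvDedupStep []).Nodup := P.imp ne_of_lt
  have hnodupA := nodupA cat bl [] (by simp)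
  refine PySem.List.sorted_eq_of_perm_of_pairwise_lt _ _ _ ?_ P
  refine (List.perm_ext_iff_of_nodup hnodupU hnodupA).mpr ?_
  intro x
  rw [M x, memA cat bl [] x, PySem.List.mem_sorted]
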